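-- pv_equiv track=rewrite | github.com/ArionDas/nlp_with_pytorch_from_scratch | 01_tokenization_embeddings/word2vec_pytorch.py | create_cbow_samples
-- ===== SOURCE A (Python) =====
-- def create_cbow_samples(
--     words: list[str],
--     word2idx: dict[str, int],
--     window_size: int = 2
-- ) -> list[tuple[list[int], int]]:
--     """
--     Create CBOW training samples: (context_words, target_word).
--
--     Args:
--         words: List of words in corpus
--         word2idx: Word to index mapping
--         window_size: Context window size on each side
--
--     Returns:
--         List of (context_ids, target_id) tuples
--     """
--     samples = []
--     unk_id = word2idx.get("<UNK>", 0)
--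
--     for i in range(window_size, len(words) - window_size):
--         target = words[i]
--         if target not in word2idx:
--             continue
--
--         context = []
--         for j in range(i - window_size, i + window_size + 1):
--             if j != i:
--                 ctx_word = words[j]
--                 context.append(word2idx.get(ctx_word, unk_id))
--
--         target_id = word2idx[target]
--         samples.append((context, target_id))
--
--     return samples
-- ===== SOURCE B (Python) =====
-- def create_cbow_samples(
--     words: list[str],
--     word2idx: dict[str, int],
--     window_size: int = 2
-- ) -> list[tuple[list[int], int]]:
--     """Stream the corpus once through a bounded sliding buffer of 2*window_size+1
--     tokens; emit a sample whenever the buffer is full and its center word is in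
--     the vocabulary.  No random access into the corpus."""
--     unk_id = word2idx.get("<UNK>", 0)
--     span = 2 * window_size + 1
--     buf_words = []
--     buf_ids = []
--     samples = []
--     for w in words:
--         buf_words.append(w)
--         buf_ids.append(word2idx.get(w, unk_id))
--         if len(buf_words) > span:
--             buf_words.pop(0)
--             buf_ids.pop(0)
--         if len(buf_words) == span:
--             center = buf_words[window_size]
--             if center in word2idx:
--                 samples.append((buf_ids[:window_size] + buf_ids[window_size + 1:],
--                                 word2idx[center]))
--     return samples
-- ===== Notes on version B (the rewrite author's own statement) =====
-- stated objective: alternative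
-- what changed: B replaces A's random-access index loop (range over centers with an inner lookup loop over window indices) by a single streaming pass that pushes each token through a bounded sliding buffer of 2*window_size+1 (word, id) entries, emitting a sample from the buffer whenever it is full and its center is in the vocabulary.
import Mathlib
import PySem

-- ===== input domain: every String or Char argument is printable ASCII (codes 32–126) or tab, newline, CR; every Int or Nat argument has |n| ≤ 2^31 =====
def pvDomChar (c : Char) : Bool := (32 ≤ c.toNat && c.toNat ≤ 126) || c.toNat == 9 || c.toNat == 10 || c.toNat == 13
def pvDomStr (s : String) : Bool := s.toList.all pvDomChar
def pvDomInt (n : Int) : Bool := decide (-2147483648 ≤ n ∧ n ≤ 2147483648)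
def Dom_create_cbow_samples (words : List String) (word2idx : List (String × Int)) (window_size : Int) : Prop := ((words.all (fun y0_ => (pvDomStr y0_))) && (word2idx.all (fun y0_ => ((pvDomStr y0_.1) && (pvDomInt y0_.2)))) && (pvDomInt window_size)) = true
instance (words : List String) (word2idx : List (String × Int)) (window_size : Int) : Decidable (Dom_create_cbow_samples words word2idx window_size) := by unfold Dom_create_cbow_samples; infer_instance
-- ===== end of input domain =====

-- B streams the corpus once through a bounded sliding buffer instead of A's random-access index/window loops (alternative decomposition, same cost).
-- ===== PORT A =====
def create_cbow_samples (words : List String) (word2idx : List (String × Int)) (window_size : Int) : List (List Int × Int) :=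
  let d := PySem.Dict.mk word2idx
  let unk_id := PySem.Dict.getD d "<UNK>" 0
  (PySem.List.pyRange window_size ((words.length : Int) - window_size) 1).foldl
    (fun samples i =>
      let target := (PySem.List.pyGet? words i).getD ""   -- in range under Pre_
      if PySem.Dict.contains d target then
        let context := (PySem.List.pyRange (i - window_size) (i + window_size + 1) 1).foldl
          (fun context j =>
            if j ≠ i then
              let ctx_word := (PySem.List.pyGet? words j).getD ""   -- in range under Pre_
              context ++ [PySem.Dict.getD d ctx_word unk_id]
            else context) ([] : List Int)
        let target_id := PySem.Dict.getD d target 0   -- key present: the default is never used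
        samples ++ [(context, target_id)]
      else samples) []

-- ===== PORT B =====
def create_cbow_samples_alt (words : List String) (word2idx : List (String × Int)) (window_size : Int) : List (List Int × Int) :=
  let d := PySem.Dict.mk word2idx
  let unk_id := PySem.Dict.getD d "<UNK>" 0
  let span := 2 * window_size + 1
  let st := words.foldl
    (fun (st : List String × List Int × List (List Int × Int)) w =>
      let bw0 := st.1 ++ [w]
      let bi0 := st.2.1 ++ [PySem.Dict.getD d w unk_id]
      -- buf.pop(0): the buffer is nonempty here (we just appended), so Python's pop(0) leaves its tail
      let bw := if span < (bw0.length : Int) then bw0.tail else bw0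
      let bi := if span < (bi0.length : Int) then bi0.tail else bi0
      if (bw.length : Int) = span then
        let center := (PySem.List.pyGet? bw window_size).getD ""
        if PySem.Dict.contains d center then
          (bw, bi,
           st.2.2 ++ [(PySem.List.slice bi none (some window_size) ++
                       PySem.List.slice bi (some (window_size + 1)) none,
                       PySem.Dict.getD d center 0)])   -- key present: the default is never used
        else (bw, bi, st.2.2)
      else (bw, bi, st.2.2)) (([], [], []) : List String × List Int × List (List Int × Int))
  st.2.2

-- ===== PRECONDITION & SPEC =====
-- Pre_ excludes only inputs where A raises: with window_size < 0 the loop always reaches an index ≥ len(words) (IndexError).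
def Pre_create_cbow_samples (words : List String) (word2idx : List (String × Int)) (window_size : Int) : Prop :=
  0 ≤ window_size
instance (words : List String) (word2idx : List (String × Int)) (window_size : Int) : Decidable (Pre_create_cbow_samples words word2idx window_size) := by unfold Pre_create_cbow_samples; infer_instance
def pvWitness_create_cbow_samples : List String × (List (String × Int)) × Int :=
  (["a", "b", "c", "b", "a"], [("a", 0), ("b", 1)], 1)
def Spec_create_cbow_samples (words : List String) (word2idx : List (String × Int)) (window_size : Int) (out : List (List Int × Int)) : Prop := out = create_cbow_samples_alt words word2idx window_size
instance (words : List String) (word2idx : List (String × Int)) (window_size : Int) (out : List (List Int × Int)) : Decidable (Spec_create_cbow_samples words word2idx window_size out) := by unfold Spec_create_cbow_samples; infer_instance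

-- ===== CLAIM (what is proved, stated in full; the proofs are below) =====
def Claim_equal_create_cbow_samples : Prop := ∀ (words : List String) (word2idx : List (String × Int)) (window_size : Int), Dom_create_cbow_samples words word2idx window_size → Pre_create_cbow_samples words word2idx window_size → Spec_create_cbow_samples words word2idx window_size (create_cbow_samples words word2idx window_size)

-- ===== LEMMAS AND PROOFS =====

-- A's per-center body, named so the fold can be reasoned about.
def Astep (ws : List String) (d : PySem.Dict String Int) (unk w : Int)
    (samples : List (List Int × Int)) (i : Int) : List (List Int × Int) :=
  if PySem.Dict.contains d ((PySem.List.pyGet? ws i).getD "") then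
    samples ++ [((PySem.List.pyRange (i - w) (i + w + 1) 1).foldl
      (fun context j =>
        if j ≠ i then
          context ++ [PySem.Dict.getD d ((PySem.List.pyGet? ws j).getD "") unk]
        else context) ([] : List Int),
      PySem.Dict.getD d ((PySem.List.pyGet? ws i).getD "") 0)]
  else samples

theorem A_as_fold (words : List String) (word2idx : List (String × Int)) (w : Int) :
    create_cbow_samples words word2idx w
      = (PySem.List.pyRange w ((words.length : Int) - w) 1).foldl
          (Astep words (PySem.Dict.mk word2idx)
            (PySem.Dict.getD (PySem.Dict.mk word2idx) "<UNK>" 0) w) [] := rfl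

-- B's per-token body, named so the fold can be reasoned about.
def Bstep (word2idx : List (String × Int)) (w : Int)
    (st : List String × List Int × List (List Int × Int)) (x : String) :
    List String × List Int × List (List Int × Int) :=
  let d := PySem.Dict.mk word2idx
  let unk_id := PySem.Dict.getD d "<UNK>" 0
  let span := 2 * w + 1
  let bw0 := st.1 ++ [x]
  let bi0 := st.2.1 ++ [PySem.Dict.getD d x unk_id]
  let bw := if span < (bw0.length : Int) then bw0.tail else bw0
  let bi := if span < (bi0.length : Int) then bi0.tail else bi0
  if (bw.length : Int) = span then
    let center := (PySem.List.pyGet? bw w).getD ""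
    if PySem.Dict.contains d center then
      (bw, bi,
       st.2.2 ++ [(PySem.List.slice bi none (some w) ++
                   PySem.List.slice bi (some (w + 1)) none,
                   PySem.Dict.getD d center 0)])
    else (bw, bi, st.2.2)
  else (bw, bi, st.2.2)

theorem B_as_fold (words : List String) (word2idx : List (String × Int)) (w : Int) :
    create_cbow_samples_alt words word2idx w
      = (words.foldl (Bstep word2idx w) ([], [], [])).2.2 := rfl

-- the id a word maps to in B's buffer
def fW (word2idx : List (String × Int)) (s : String) : Int :=
  PySem.Dict.getD (PySem.Dict.mk word2idx) s
    (PySem.Dict.getD (PySem.Dict.mk word2idx) "<UNK>" 0)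

-- B's word buffer after consuming prefix p: the last 2w+1 words of p
def bufW (w : Int) (p : List String) : List String :=
  p.drop (p.length - (2 * w.toNat + 1))

-- indexing is unchanged by appending one element past the index
theorem pyGet?_append_lt {α : Type} (p : List α) (x : α) (j : Int)
    (h0 : 0 ≤ j) (h : j < (p.length : Int)) :
    PySem.List.pyGet? (p ++ [x]) j = PySem.List.pyGet? p j := by
  rw [PySem.List.pyGet?_eq_some_getElem (p ++ [x]) h0 (by simp; omega),
      PySem.List.pyGet?_eq_some_getElem p h0 h]
  congr 1
  rw [List.getElem_append_left]

-- A context-collecting fold over indices a..b-1 appends exactly the slice [a:b] of the mapped list.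
theorem ctx_fold_eq_slice (ws0 : List String) (f : String → Int) :
    ∀ (n : Nat) (a b : Int) (acc : List Int), (b - a).toNat = n → 0 ≤ a → a ≤ b → b ≤ (ws0.length : Int) →
      (PySem.List.pyRange a b 1).foldl
        (fun ctx j => ctx ++ [f ((PySem.List.pyGet? ws0 j).getD "")]) acc
      = acc ++ PySem.List.slice (ws0.map f) (some a) (some b) := by
  intro n
  induction n with
  | zero =>
    intro a b acc hn h0 hab hb
    have hba : b = a := by omega
    subst hba
    rw [PySem.List.pyRange_one_eq_nil le_rfl,
        PySem.List.slice_toNat _ h0 h0]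
    simp
  | succ n ih =>
    intro a b acc hn h0 hab hb
    have hlt : a < b := by omega
    rw [PySem.List.pyRange_one_cons hlt, List.foldl_cons,
        ih (a + 1) b _ (by omega) (by omega) (by omega) hb]
    have hA : a.toNat < ws0.length := by omega
    have h1 : PySem.List.pyGet? ws0 a = some ws0[a.toNat] :=
      PySem.List.pyGet?_eq_some_getElem _ h0 (by omega)
    rw [PySem.List.slice_toNat _ h0 (by omega : (0:Int) ≤ b),
        PySem.List.slice_toNat _ (by omega : (0:Int) ≤ a + 1) (by omega : (0:Int) ≤ b)]
    have hdrop : (ws0.map f).drop a.toNat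
        = f ws0[a.toNat] :: (ws0.map f).drop (a.toNat + 1) := by
      rw [List.drop_eq_getElem_cons (by simpa using hA)]
      simp
    have htake : b.toNat - a.toNat = (b.toNat - (a + 1).toNat) + 1 := by omega
    rw [hdrop, htake, List.take_succ_cons, h1,
        show ((a : Int) + 1).toNat = a.toNat + 1 by omega]
    simp

-- A's inner loop at an in-vocabulary center equals the two slices of the mapped corpus.
theorem inner_eq_slices (words : List String) (d : PySem.Dict String Int) (unk_id : Int)
    (w i : Int) (hw : 0 ≤ w) (hi : w ≤ i) (hilen : i < (words.length : Int) - w) :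
    (PySem.List.pyRange (i - w) (i + w + 1) 1).foldl
        (fun context j =>
          if j ≠ i then
            context ++ [PySem.Dict.getD d ((PySem.List.pyGet? words j).getD "") unk_id]
          else context) ([] : List Int)
    = PySem.List.slice (words.map (fun x => PySem.Dict.getD d x unk_id)) (some (i - w)) (some i) ++
        PySem.List.slice (words.map (fun x => PySem.Dict.getD d x unk_id)) (some (i + 1)) (some (i + w + 1)) := by
  rw [PySem.List.pyRange_one_append (i - w) i (i + w + 1) (by omega) (by omega),
      PySem.List.pyRange_one_cons (by omega : i < i + w + 1),
      List.foldl_append, List.foldl_cons]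
  simp only [ne_eq, not_true_eq_false, if_false]
  have e1 : (PySem.List.pyRange (i - w) i 1).foldl
      (fun context j =>
        if j ≠ i then
          context ++ [PySem.Dict.getD d ((PySem.List.pyGet? words j).getD "") unk_id]
        else context) ([] : List Int)
    = (PySem.List.pyRange (i - w) i 1).foldl
        (fun context j => context ++ [PySem.Dict.getD d ((PySem.List.pyGet? words j).getD "") unk_id]) [] := by
    apply PySem.List.foldl_congr_mem
    intro acc x hx
    have := (PySem.List.mem_pyRange_one).1 hx
    simp [show x ≠ i by omega]
  have e2 : ∀ acc : List Int, (PySem.List.pyRange (i + 1) (i + w + 1) 1).foldl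
      (fun context j =>
        if j ≠ i then
          context ++ [PySem.Dict.getD d ((PySem.List.pyGet? words j).getD "") unk_id]
        else context) acc
    = (PySem.List.pyRange (i + 1) (i + w + 1) 1).foldl
        (fun context j => context ++ [PySem.Dict.getD d ((PySem.List.pyGet? words j).getD "") unk_id]) acc := by
    intro acc
    apply PySem.List.foldl_congr_mem
    intro acc' x hx
    have := (PySem.List.mem_pyRange_one).1 hx
    simp [show x ≠ i by omega]
  rw [e1, e2,
      ctx_fold_eq_slice words (fun x => PySem.Dict.getD d x unk_id) _ (i - w) i _ rfl (by omega) (by omega) (by omega),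
      ctx_fold_eq_slice words (fun x => PySem.Dict.getD d x unk_id) _ (i + 1) (i + w + 1) _ rfl (by omega) (by omega) (by omega)]
  simp

-- Astep only appends
theorem Astep_acc (ws : List String) (d : PySem.Dict String Int) (unk w : Int)
    (acc : List (List Int × Int)) (i : Int) :
    Astep ws d unk w acc i = acc ++ Astep ws d unk w [] i := by
  unfold Astep
  split_ifs <;> simp

-- Astep ignores a freshly appended element while the whole window lies inside p
theorem Astep_append (p : List String) (x : String) (d : PySem.Dict String Int)
    (unk w : Int) (acc : List (List Int × Int)) (i : Int)
    (hw : 0 ≤ w) (hiw : w ≤ i) (hi : i + w < (p.length : Int)) :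
    Astep (p ++ [x]) d unk w acc i = Astep p d unk w acc i := by
  unfold Astep
  rw [pyGet?_append_lt p x i (by omega) (by omega)]
  have hctx : (PySem.List.pyRange (i - w) (i + w + 1) 1).foldl
      (fun context j =>
        if j ≠ i then
          context ++ [PySem.Dict.getD d ((PySem.List.pyGet? (p ++ [x]) j).getD "") unk]
        else context) ([] : List Int)
    = (PySem.List.pyRange (i - w) (i + w + 1) 1).foldl
        (fun context j =>
          if j ≠ i then
            context ++ [PySem.Dict.getD d ((PySem.List.pyGet? p j).getD "") unk]
          else context) ([] : List Int) := by
    apply PySem.List.foldl_congr_mem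
    intro acc' j hj
    have := (PySem.List.mem_pyRange_one).1 hj
    rw [pyGet?_append_lt p x j (by omega) (by omega)]
  rw [hctx]

-- appending one word extends A's samples by at most the one new center p.length - w
theorem A_snoc (p : List String) (x : String) (word2idx : List (String × Int)) (w : Int)
    (hw : 0 ≤ w) :
    create_cbow_samples (p ++ [x]) word2idx w
      = create_cbow_samples p word2idx w ++
        (if 2 * w ≤ (p.length : Int) then
          Astep (p ++ [x]) (PySem.Dict.mk word2idx)
            (PySem.Dict.getD (PySem.Dict.mk word2idx) "<UNK>" 0) w [] ((p.length : Int) - w)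
         else []) := by
  rw [A_as_fold, A_as_fold]
  by_cases h : 2 * w ≤ (p.length : Int)
  · rw [if_pos h]
    have hlen : ((p ++ [x]).length : Int) - w = ((p.length : Int) - w) + 1 := by
      simp; omega
    rw [hlen, PySem.List.pyRange_one_succ_right (by omega), List.foldl_append, List.foldl_cons,
        List.foldl_nil]
    have hcong : (PySem.List.pyRange w ((p.length : Int) - w) 1).foldl
        (Astep (p ++ [x]) (PySem.Dict.mk word2idx)
          (PySem.Dict.getD (PySem.Dict.mk word2idx) "<UNK>" 0) w) []
      = (PySem.List.pyRange w ((p.length : Int) - w) 1).foldl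
          (Astep p (PySem.Dict.mk word2idx)
            (PySem.Dict.getD (PySem.Dict.mk word2idx) "<UNK>" 0) w) [] := by
      apply PySem.List.foldl_congr_mem
      intro acc i hi
      have := (PySem.List.mem_pyRange_one).1 hi
      exact Astep_append p x _ _ _ acc i hw (by omega) (by omega)
    rw [hcong, Astep_acc]
  · rw [if_neg h]
    have h1 : create_cbow_samples p word2idx w = [] := by
      rw [A_as_fold, PySem.List.pyRange_one_eq_nil (by omega)]
      rfl
    rw [A_as_fold] at h1
    rw [PySem.List.pyRange_one_eq_nil (by simp; omega), h1]
    rfl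

-- pushing one element through a length-N sliding window implemented as append + conditional pop(0)
theorem drop_snoc {α : Type} (N : Nat) (hN : 0 < N) (p : List α) (y : α) :
    (if (N : Int) < ((p.drop (p.length - N) ++ [y]).length : Int)
       then (p.drop (p.length - N) ++ [y]).tail
       else p.drop (p.length - N) ++ [y])
    = (p ++ [y]).drop ((p ++ [y]).length - N) := by
  by_cases h : N ≤ p.length
  · rw [if_pos (by simp; omega)]
    have hne : p.drop (p.length - N) ≠ [] := by
      simp [List.drop_eq_nil_iff]; omega
    rw [List.tail_append_of_ne_nil hne, List.tail_drop]
    rw [List.drop_append_of_le_length (by simp; omega)]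
    congr 1
    simp; omega
  · rw [if_neg (by simp; omega)]
    rw [show p.length - N = 0 by omega, show (p ++ [y]).length - N = 0 by simp; omega]
    simp

-- ONE B-step maps the state for prefix p to the state for prefix p ++ [x]
theorem Bstep_state (word2idx : List (String × Int)) (w : Int) (hw : 0 ≤ w)
    (p : List String) (x : String) :
    Bstep word2idx w (bufW w p, (bufW w p).map (fW word2idx), create_cbow_samples p word2idx w) x
      = (bufW w (p ++ [x]), (bufW w (p ++ [x])).map (fW word2idx),
         create_cbow_samples (p ++ [x]) word2idx w) := by
  have hNint : (2 * w + 1 : Int) = ((2 * w.toNat + 1 : Nat) : Int) := by push_cast; omega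
  unfold Bstep
  dsimp only
  have hmap : (bufW w p).map (fW word2idx) ++
        [PySem.Dict.getD (PySem.Dict.mk word2idx) x
          (PySem.Dict.getD (PySem.Dict.mk word2idx) "<UNK>" 0)]
      = (bufW w p ++ [x]).map (fW word2idx) := by
    simp [fW]
  rw [hmap]
  rw [show ((((bufW w p ++ [x]).map (fW word2idx)).length : Nat) : Int)
        = (((bufW w p ++ [x]).length : Nat) : Int) by simp]
  rw [← List.map_tail, ← apply_ite (List.map (fW word2idx))]
  have hbw : (if 2 * w + 1 < ((bufW w p ++ [x]).length : Int)
      then (bufW w p ++ [x]).tail else bufW w p ++ [x]) = bufW w (p ++ [x]) := by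
    rw [hNint]
    exact drop_snoc _ (by omega) p x
  rw [hbw]
  by_cases hE : 2 * w.toNat + 1 ≤ p.length + 1
  · rw [if_pos (by simp [bufW]; omega)]
    have hcen : (PySem.List.pyGet? (bufW w (p ++ [x])) w).getD ""
        = (PySem.List.pyGet? (p ++ [x]) ((p.length : Int) - w)).getD "" := by
      rw [PySem.List.pyGet?_eq_some_getElem _ hw (by simp [bufW]; omega),
          PySem.List.pyGet?_eq_some_getElem _ (by omega) (by simp; omega)]
      simp [bufW]
      congr 1
      omega
    rw [hcen,
        A_snoc p x word2idx w hw, if_pos (by omega : 2 * w ≤ (p.length : Int))]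
    unfold Astep
    by_cases hc : PySem.Dict.contains (PySem.Dict.mk word2idx)
        ((PySem.List.pyGet? (p ++ [x]) ((p.length : Int) - w)).getD "") = true
    · rw [if_pos hc, if_pos hc]
      have hctx := inner_eq_slices (p ++ [x]) (PySem.Dict.mk word2idx)
        (PySem.Dict.getD (PySem.Dict.mk word2idx) "<UNK>" 0) w ((p.length : Int) - w)
        hw (by omega) (by simp)
      rw [Prod.mk.injEq, Prod.mk.injEq]
      refine ⟨rfl, rfl, ?_⟩
      rw [hctx]
      simp only [List.nil_append]
      congr 2
      rw [Prod.mk.injEq]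
      refine ⟨?_, rfl⟩
      congr 1
      · -- left context slice
        rw [PySem.List.slice_to _ hw,
            PySem.List.slice_toNat _ (by omega) (by omega)]
        simp only [bufW, List.map_drop, List.length_append, List.length_cons,
          List.length_nil]
        congr 1 <;> first
          | omega
          | (congr 1 <;> omega)
      · -- right context slice
        rw [PySem.List.slice_from _ (by omega : (0:Int) ≤ w + 1),
            PySem.List.slice_toNat _ (by omega) (by omega)]
        simp only [bufW, List.map_drop, List.length_append, List.length_cons,
          List.length_nil, List.drop_drop]
        rw [List.take_of_length_le (by simp)]
        congr 1
        omega
    · rw [if_neg hc, if_neg hc]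
      simp
  · rw [if_neg (by simp [bufW]; omega)]
    rw [A_snoc p x word2idx w hw, if_neg (by omega : ¬ 2 * w ≤ (p.length : Int))]
    simp

theorem B_inv (word2idx : List (String × Int)) (w : Int) (hw : 0 ≤ w) :
    ∀ (rest p : List String),
      List.foldl (Bstep word2idx w)
        (bufW w p, (bufW w p).map (fW word2idx), create_cbow_samples p word2idx w) rest
      = (bufW w (p ++ rest), (bufW w (p ++ rest)).map (fW word2idx),
         create_cbow_samples (p ++ rest) word2idx w) := by
  intro rest
  induction rest with
  | nil => intro p; simp
  | cons y ys ih =>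
    intro p
    rw [List.foldl_cons, Bstep_state word2idx w hw p y, ih (p ++ [y])]
    simp

-- ===== VERDICT (by name: the statement is the Claim_ definition above) =====
theorem create_cbow_samples_spec : Claim_equal_create_cbow_samples := by
  intro words word2idx w _ hpre
  unfold Pre_create_cbow_samples at hpre
  unfold Spec_create_cbow_samples
  rw [B_as_fold]
  have h0 : bufW w ([] : List String) = [] := by simp [bufW]
  have hA0 : create_cbow_samples [] word2idx w = [] := by
    rw [A_as_fold, PySem.List.pyRange_one_eq_nil (by simp; omega)]
    rfl
  have := B_inv word2idx w hpre words []
  rw [h0, hA0] at this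
  simp only [List.map_nil, List.nil_append] at this
  rw [this]
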